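-- pv_equiv track=rewrite | github.com/BAMDH/Cosas_Uni | Intro programación/Prácticas/Resueltos/cambiarRepetidos.py | cambiarRepetidos
-- ===== SOURCE A (Python) =====
-- def  cambiarRepetidos(lista,posicion=0):
--     nueva_lista=[]
--     while(posicion!=len(lista)):
--         if lista[posicion] in nueva_lista:
--             nueva_lista=nueva_lista+[-1]
--         else:
--             nueva_lista=nueva_lista+[lista[posicion]]
--         posicion=posicion+1
--     return nueva_lista
-- ===== SOURCE B (Python) =====
-- def cambiarRepetidos(lista, posicion=0):
--     primera = {}
--     for i in range(posicion, len(lista)):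
--         primera.setdefault(lista[i], i)
--     resultado = []
--     for i in range(posicion, len(lista)):
--         resultado.append(lista[i] if primera[lista[i]] == i else -1)
--     return resultado
-- ===== Notes on version B (the rewrite author's own statement) =====
-- stated objective: faster
-- what changed: A grows an output accumulator and decides each element by a linear membership scan of that partial output; B drops the accumulator entirely and instead builds a value-to-first-index dictionary over range(posicion, len(lista)) in one pass, then emits each element independently by comparing its index with the stored first occurrence.
import Mathlib
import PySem

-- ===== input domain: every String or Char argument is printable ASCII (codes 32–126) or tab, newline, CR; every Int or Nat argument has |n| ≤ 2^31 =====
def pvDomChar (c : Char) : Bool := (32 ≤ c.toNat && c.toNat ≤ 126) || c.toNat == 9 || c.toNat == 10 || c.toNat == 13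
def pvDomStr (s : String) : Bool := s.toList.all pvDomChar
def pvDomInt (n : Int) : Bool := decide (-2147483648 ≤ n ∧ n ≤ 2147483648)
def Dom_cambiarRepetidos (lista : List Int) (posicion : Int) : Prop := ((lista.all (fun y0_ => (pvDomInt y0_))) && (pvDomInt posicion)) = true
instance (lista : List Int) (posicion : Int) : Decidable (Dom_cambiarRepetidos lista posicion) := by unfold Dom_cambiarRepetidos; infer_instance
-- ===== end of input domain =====

-- B replaces A's growing-accumulator membership scan by a two-pass first-occurrence-index
-- dictionary (objective: faster, no quadratic membership scan); return values agree on Pre_.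

-- ===== PORT A =====
-- while posicion != len(lista): append -1 if lista[posicion] already in the output, else lista[posicion]
def cambiarRepetidosLoop (lista : List Int) (posicion : Int) (nueva : List Int) : Nat → List Int
  | 0 => nueva
  | fuel + 1 =>
    if posicion = (lista.length : Int) then nueva
    else
      match PySem.List.pyGet? lista posicion with
      | none => nueva  -- IndexError in Python; outside Pre_
      | some x =>
        cambiarRepetidosLoop lista (posicion + 1)
          (if nueva.contains x then nueva ++ [-1] else nueva ++ [x]) fuel

def cambiarRepetidos (lista : List Int) (posicion : Int) : List Int :=
  cambiarRepetidosLoop lista posicion [] ((lista.length - posicion).toNat)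

-- ===== PORT B =====
-- B-side helper: 'lista[i] if primera[lista[i]] == i else -1' — the stored first index is compared
-- with i; the none branch is Python's KeyError, unreachable because the first pass stored every key
def pvPick (o : Option Int) (v i : Int) : Int :=
  match o with
  | some j => if j = i then v else -1
  | none => -1

def cambiarRepetidos_alt (lista : List Int) (posicion : Int) : List Int :=
  let idxs := PySem.List.pyRange posicion (lista.length : Int) 1
  let primera := idxs.foldl
    (fun d i => PySem.Dict.setdefault d (PySem.List.pyGetD lista i 0) i)
    PySem.Dict.empty
  idxs.foldl
    (fun resultado i =>
      resultado ++ [pvPick (primera.get? (PySem.List.pyGetD lista i 0)) (PySem.List.pyGetD lista i 0) i])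
    []

-- ===== PRECONDITION & SPEC =====
-- Pre_ excludes exactly the inputs where Python A raises IndexError (posicion < -len or posicion > len).
def Pre_cambiarRepetidos (lista : List Int) (posicion : Int) : Prop :=
  -(lista.length : Int) ≤ posicion ∧ posicion ≤ (lista.length : Int)
instance (lista : List Int) (posicion : Int) : Decidable (Pre_cambiarRepetidos lista posicion) := by
  unfold Pre_cambiarRepetidos; infer_instance

def pvWitness_cambiarRepetidos : List Int × Int := ([1, 2, 1], 0)

def Spec_cambiarRepetidos (lista : List Int) (posicion : Int) (out : List Int) : Prop := out = cambiarRepetidos_alt lista posicion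
instance (lista : List Int) (posicion : Int) (out : List Int) : Decidable (Spec_cambiarRepetidos lista posicion out) := by unfold Spec_cambiarRepetidos; infer_instance

-- ===== CLAIM (what is proved, stated in full; the proofs are below) =====
def Claim_equal_cambiarRepetidos : Prop := ∀ (lista : List Int) (posicion : Int), Dom_cambiarRepetidos lista posicion → Pre_cambiarRepetidos lista posicion → Spec_cambiarRepetidos lista posicion (cambiarRepetidos lista posicion)

-- ===== LEMMAS AND PROOFS =====

-- the values both programs walk over: lista[i] for i in range(posicion, len(lista))
def pvVals (lista : List Int) (posicion : Int) : List Int :=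
  (PySem.List.pyRange posicion (lista.length : Int) 1).map (fun i => PySem.List.pyGetD lista i 0)

-- A's loop body, abstracted over the walked values
def pvFoldA (nueva : List Int) : List Int → List Int
  | [] => nueva
  | v :: rest => pvFoldA (if nueva.contains v then nueva ++ [-1] else nueva ++ [v]) rest

-- common canonical form: keep a value iff it is not among the previously walked values
def pvCanon (seen : List Int) : List Int → List Int
  | [] => []
  | v :: rest => (if v ∈ seen then -1 else v) :: pvCanon (seen ++ [v]) rest

lemma pvGet_some (lista : List Int) (i : Int)
    (h1 : -(lista.length : Int) ≤ i) (h2 : i < (lista.length : Int)) :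
    PySem.List.pyGet? lista i = some (PySem.List.pyGetD lista i 0) := by
  by_cases h0 : 0 ≤ i
  · have hk : PySem.List.pyIdx? lista.length i = some i.toNat := by
      simp [PySem.List.pyIdx?, h0, h2]
    have hlt : i.toNat < lista.length := by omega
    simp [PySem.List.pyGet?, PySem.List.pyGetD, hk, List.getElem?_eq_getElem hlt]
  · have hk : PySem.List.pyIdx? lista.length i = some (lista.length - (-i).toNat) := by
      simp [PySem.List.pyIdx?, h0, h1]
    have hlt : lista.length - (-i).toNat < lista.length := by omega
    simp [PySem.List.pyGet?, PySem.List.pyGetD, hk, List.getElem?_eq_getElem hlt]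

lemma pvLoopA_eq (lista : List Int) :
    ∀ (fuel : Nat) (posicion : Int) (nueva : List Int),
      -(lista.length : Int) ≤ posicion → posicion ≤ (lista.length : Int) →
      ((lista.length : Int) - posicion).toNat ≤ fuel →
      cambiarRepetidosLoop lista posicion nueva fuel = pvFoldA nueva (pvVals lista posicion) := by
  intro fuel
  induction fuel with
  | zero =>
    intro posicion nueva h1 h2 hf
    have hp : posicion = (lista.length : Int) := by omega
    simp [cambiarRepetidosLoop, pvVals, PySem.List.pyRange_one_eq_nil (le_of_eq hp.symm), pvFoldA]
  | succ fuel ih =>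
    intro posicion nueva h1 h2 hf
    by_cases hp : posicion = (lista.length : Int)
    · simp [cambiarRepetidosLoop, hp, pvVals, PySem.List.pyRange_one_eq_nil (le_refl _), pvFoldA]
    · have hlt : posicion < (lista.length : Int) := lt_of_le_of_ne h2 hp
      have hget := pvGet_some lista posicion h1 hlt
      have hrange := PySem.List.pyRange_one_cons hlt
      rw [show cambiarRepetidosLoop lista posicion nueva (fuel + 1)
            = cambiarRepetidosLoop lista (posicion + 1)
                (if nueva.contains (PySem.List.pyGetD lista posicion 0) then nueva ++ [-1]
                 else nueva ++ [PySem.List.pyGetD lista posicion 0]) fuel by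
            simp [cambiarRepetidosLoop, hp, hget]]
      rw [ih (posicion + 1) _ (by omega) (by omega) (by omega)]
      simp [pvVals, hrange, pvFoldA]

lemma pvFoldA_canon :
    ∀ (vs nueva seen : List Int),
      (∀ x : Int, x ≠ -1 → (nueva.contains x = true ↔ x ∈ seen)) →
      pvFoldA nueva vs = nueva ++ pvCanon seen vs := by
  intro vs
  induction vs with
  | nil => intro nueva seen _; simp [pvFoldA, pvCanon]
  | cons v rest ih =>
    intro nueva seen h
    by_cases hv : v = -1
    · subst hv
      have hstep : pvFoldA nueva (-1 :: rest) = pvFoldA (nueva ++ [-1]) rest := by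
        simp [pvFoldA]
      rw [hstep, ih (nueva ++ [-1]) (seen ++ [-1]) ?_]
      · simp [pvCanon, List.append_assoc]
      · intro x hx
        rw [List.contains_append]
        simp only [Bool.or_eq_true]
        constructor
        · rintro (h' | h')
          · exact List.mem_append_left _ ((h x hx).1 h')
          · exfalso; apply hx; simpa using h'
        · intro h'
          rcases List.mem_append.1 h' with h' | h'
          · exact Or.inl ((h x hx).2 h')
          · exfalso; apply hx; simpa using h'
    · have hc : nueva.contains v = true ↔ v ∈ seen := h v hv
      by_cases hs : v ∈ seen
      · have hm : v ∈ nueva := by simpa using hc.2 hs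
        have hstep : pvFoldA nueva (v :: rest) = pvFoldA (nueva ++ [-1]) rest := by
          simp [pvFoldA, hm]
        rw [hstep, ih (nueva ++ [-1]) (seen ++ [v]) ?_]
        · simp [pvCanon, hs, List.append_assoc]
        · intro x hx
          rw [List.contains_append]
          simp only [Bool.or_eq_true]
          constructor
          · rintro (h' | h')
            · exact List.mem_append_left _ ((h x hx).1 h')
            · exfalso; apply hx; simpa using h'
          · intro h'
            rcases List.mem_append.1 h' with h' | h'
            · exact Or.inl ((h x hx).2 h')
            · simp at h'; subst h'; exact Or.inl ((h x hx).2 hs)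
      · have hm : v ∉ nueva := fun hmm => hs (hc.1 (by simpa using hmm))
        have hstep : pvFoldA nueva (v :: rest) = pvFoldA (nueva ++ [v]) rest := by
          simp [pvFoldA, hm]
        rw [hstep, ih (nueva ++ [v]) (seen ++ [v]) ?_]
        · simp [pvCanon, hs, List.append_assoc]
        · intro x hx
          rw [List.contains_append]
          simp only [Bool.or_eq_true]
          constructor
          · rintro (h' | h')
            · exact List.mem_append_left _ ((h x hx).1 h')
            · simp at h'; subst h'; exact List.mem_append_right _ (by simp)
          · intro h'
            rcases List.mem_append.1 h' with h' | h'
            · exact Or.inl ((h x hx).2 h')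
            · simp at h'; subst h'; exact Or.inr (by simp)

lemma pvFoldSetdefault_get? (g : Int → Int) :
    ∀ (l : List Int) (d : PySem.Dict Int Int) (k : Int),
      (l.foldl (fun d i => PySem.Dict.setdefault d (g i) i) d).get? k
      = match d.get? k with
        | some v => some v
        | none => l.find? (fun j => g j == k) := by
  intro l
  induction l with
  | nil => intro d k; cases hd : d.get? k <;> simp [List.find?, hd]
  | cons i l ih =>
    intro d k
    rw [List.foldl_cons, ih]
    by_cases hc : d.contains (g i) = true
    · have hd : PySem.Dict.setdefault d (g i) i = d := by
        simp [PySem.Dict.setdefault, hc]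
      rw [hd]
      by_cases hk : g i = k
      · have hiso : (d.get? k).isSome = true := by
          rw [hk] at hc
          rw [PySem.Dict.contains_eq_isSome_get?] at hc
          exact hc
        cases hd' : d.get? k with
        | none => rw [hd'] at hiso; simp at hiso
        | some v => simp
      · cases hd' : d.get? k with
        | none => simp [List.find?, show (g i == k) = false by simp [hk]]
        | some v => simp
    · have hd : PySem.Dict.setdefault d (g i) i
          = PySem.Dict.mk (d.items ++ [(g i, i)]) := by
        simp [PySem.Dict.setdefault, hc]
      rw [hd]
      have hdnone : d.get? (g i) = none := by
        rw [PySem.Dict.contains_eq_isSome_get?] at hc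
        exact Option.not_isSome_iff_eq_none.1 (by simpa using hc)
      by_cases hk : g i = k
      · rw [← hk, hdnone]
        have hfind : d.items.find? (fun p => p.1 == g i) = none := by
          cases hf : d.items.find? (fun p => p.1 == g i) with
          | none => rfl
          | some p => rw [show d.get? (g i) = some p.2 by simp [PySem.Dict.get?, hf]] at hdnone; cases hdnone
        have : (PySem.Dict.mk (d.items ++ [(g i, i)])).get? (g i) = some i := by
          simp [PySem.Dict.get?, List.find?_append, hfind, List.find?]
        rw [this]
        simp [List.find?]
      · have : (PySem.Dict.mk (d.items ++ [(g i, i)])).get? k = d.get? k := by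
          simp [PySem.Dict.get?, List.find?_append, List.find?,
                show (g i == k) = false by simp [hk]]
        rw [this]
        cases hd' : d.get? k with
        | none => simp [List.find?, show (g i == k) = false by simp [hk]]
        | some v => simp

lemma pvMapFind_canon (g : Int → Int) :
    ∀ (idxs pre : List Int), (pre ++ idxs).Nodup →
      idxs.map (fun i => pvPick ((pre ++ idxs).find? (fun j => g j == g i)) (g i) i)
      = pvCanon (pre.map g) (idxs.map g) := by
  intro idxs
  induction idxs with
  | nil => intro pre _; simp [pvCanon]
  | cons i rest ih =>
    intro pre hnd
    have hassoc : pre ++ i :: rest = (pre ++ [i]) ++ rest := by simp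
    have hnd' : ((pre ++ [i]) ++ rest).Nodup := by rwa [← hassoc]
    have htail := ih (pre ++ [i]) hnd'
    rw [List.map_cons]
    have hhead :
        pvPick ((pre ++ i :: rest).find? (fun j => g j == g i)) (g i) i
        = (if g i ∈ pre.map g then -1 else g i) := by
      by_cases hs : g i ∈ pre.map g
      · obtain ⟨p, hp, hpg⟩ := List.mem_map.1 hs
        have hfs : (pre.find? (fun j => g j == g i)).isSome := by
          rw [List.find?_isSome]
          exact ⟨p, hp, by simp [hpg]⟩
        obtain ⟨j0, hj0⟩ := Option.isSome_iff_exists.1 hfs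
        have hj0pre : j0 ∈ pre := List.mem_of_find?_eq_some hj0
        have hji : j0 ≠ i := by
          intro h
          have hdisj := (List.nodup_append.1 hnd).2.2
          exact hdisj j0 hj0pre i (by simp) h
        rw [List.find?_append, hj0]
        simp [pvPick, hs, hji]
      · have hfn : pre.find? (fun j => g j == g i) = none := by
          rw [List.find?_eq_none]
          intro x hx
          simp only [beq_iff_eq]
          intro hgx
          exact hs (List.mem_map.2 ⟨x, hx, hgx⟩)
        rw [List.find?_append, hfn]
        simp [pvPick, List.find?, hs]
    rw [hhead]
    have hmaps :
        rest.map (fun i' => pvPick ((pre ++ i :: rest).find? (fun j => g j == g i')) (g i') i')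
        = rest.map (fun i' => pvPick (((pre ++ [i]) ++ rest).find? (fun j => g j == g i')) (g i') i') := by
      rw [hassoc]
    rw [hmaps, htail]
    simp [pvCanon]

lemma pvAlt_eq_canon (lista : List Int) (posicion : Int) :
    cambiarRepetidos_alt lista posicion = pvCanon [] (pvVals lista posicion) := by
  show (List.foldl
      (fun resultado i =>
        resultado ++ [pvPick (((PySem.List.pyRange posicion (lista.length : Int) 1).foldl
            (fun d i => PySem.Dict.setdefault d (PySem.List.pyGetD lista i 0) i)
            PySem.Dict.empty).get? (PySem.List.pyGetD lista i 0)) (PySem.List.pyGetD lista i 0) i])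
      [] (PySem.List.pyRange posicion (lista.length : Int) 1)) = _
  rw [PySem.List.foldl_append_singleton_eq_map
        (fun i => pvPick (((PySem.List.pyRange posicion (lista.length : Int) 1).foldl
            (fun d i => PySem.Dict.setdefault d (PySem.List.pyGetD lista i 0) i)
            PySem.Dict.empty).get? (PySem.List.pyGetD lista i 0)) (PySem.List.pyGetD lista i 0) i)]
  rw [List.nil_append]
  have hmap : ((PySem.List.pyRange posicion (lista.length : Int) 1).map
      (fun i => pvPick (((PySem.List.pyRange posicion (lista.length : Int) 1).foldl
            (fun d i => PySem.Dict.setdefault d (PySem.List.pyGetD lista i 0) i)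
            PySem.Dict.empty).get? (PySem.List.pyGetD lista i 0)) (PySem.List.pyGetD lista i 0) i))
      = ((PySem.List.pyRange posicion (lista.length : Int) 1).map
      (fun i => pvPick (([] ++ PySem.List.pyRange posicion (lista.length : Int) 1).find?
            (fun j => PySem.List.pyGetD lista j 0 == PySem.List.pyGetD lista i 0))
          (PySem.List.pyGetD lista i 0) i)) := by
    apply List.map_congr_left
    intro i _
    rw [pvFoldSetdefault_get? (fun i => PySem.List.pyGetD lista i 0)]
    simp [PySem.Dict.get?_empty]
  rw [hmap, pvMapFind_canon (fun i => PySem.List.pyGetD lista i 0)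
        (PySem.List.pyRange posicion (lista.length : Int) 1) []
        (by simpa using PySem.List.nodup_pyRange_one posicion (lista.length : Int))]
  simp [pvVals]

-- ===== VERDICT (by name: the statement is the Claim_ definition above) =====
theorem cambiarRepetidos_spec : Claim_equal_cambiarRepetidos := by
  intro lista posicion _ hpre
  unfold Spec_cambiarRepetidos
  rcases hpre with ⟨h1, h2⟩
  rw [pvAlt_eq_canon]
  unfold cambiarRepetidos
  rw [pvLoopA_eq lista _ posicion [] h1 h2 (le_refl _)]
  rw [pvFoldA_canon (pvVals lista posicion) [] [] (by intro x _; simp)]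
  simp
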